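-- pv_equiv track=rewrite | github.com/opengauss-mirror/openGauss-migration-portal | multidb-portal/portal/pkg/elasticsearch/elasticsearch2datavec.py | is_valid_linux_path
-- ===== SOURCE A (Python) =====
-- def is_valid_linux_path(path) -> bool:
--     """Is valid Linux path"""
--     if not path or not isinstance(path, str):
--         return False
--
--     path_str = str(path)
--
--     if not path_str.strip():
--         return False
--
--     if '\x00' in path_str:
--         return False
--
--     if len(path_str) > 4096:
--         return False
--
--     if '\x00' in path_str:
--         return False
--
--     components = path_str.split('/')
--     for component in components:
--         if not component:
--             continue
--         if '/' in component or '\x00' in component: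
--             return False
--         if component in ('.', '..'):
--             continue
--         if len(component) > 255:
--             return False
--     return True
-- ===== SOURCE B (Python) =====
-- def is_valid_linux_path(path) -> bool:
--     """Is valid Linux path"""
--     if not path or not isinstance(path, str):
--         return False
--     path_str = str(path)
--     if not path_str.strip():
--         return False
--     if '\x00' in path_str or len(path_str) > 4096:
--         return False
--     # single pass: no slash-free run (i.e. path component) may exceed 255 chars
--     run = 0
--     for ch in path_str:
--         if ch == '/':
--             run = 0
--         else:
--             run += 1
--             if run > 255:
--                 return False
--     return True
-- ===== Notes on version B (the rewrite author's own statement) =====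
-- stated objective: alternative
-- what changed: Replaces the split('/') plus per-component loop (with redundant '/'/NUL/dot checks) by a single character scan that tracks the length of the current slash-free run and fails once it exceeds 255.
import Mathlib
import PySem

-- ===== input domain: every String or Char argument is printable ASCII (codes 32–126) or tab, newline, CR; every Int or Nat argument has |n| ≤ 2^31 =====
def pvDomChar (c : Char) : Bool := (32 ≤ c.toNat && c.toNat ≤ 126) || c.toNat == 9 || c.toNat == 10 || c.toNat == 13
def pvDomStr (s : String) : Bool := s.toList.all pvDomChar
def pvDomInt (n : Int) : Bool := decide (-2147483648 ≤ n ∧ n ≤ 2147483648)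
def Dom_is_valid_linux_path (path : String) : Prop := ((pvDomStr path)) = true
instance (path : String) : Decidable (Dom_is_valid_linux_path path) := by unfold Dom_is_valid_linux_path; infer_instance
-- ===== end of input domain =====

-- B replaces A's split('/')+component loop by one character scan tracking the current slash-free run length (alternative decomposition, same cost).

-- ===== PORT A =====
-- the 'for component in components' loop, early return and 'continue' as structural recursion
def pvCheckComp : List (List Char) → Bool
  | [] => true
  | c :: rest =>
    if c.isEmpty then pvCheckComp rest
    else if PySem.Chars.isIn ['/'] c || PySem.Chars.isIn ['\x00'] c then false
    else if c = ['.'] || c = ['.', '.'] then pvCheckComp rest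
    else if c.length > 255 then false
    else pvCheckComp rest

def is_valid_linux_path (path : String) : Bool :=
  if path == "" then false
  else if PySem.Str.strip path == "" then false
  else if PySem.Str.isIn "\x00" path then false
  else if PySem.Str.len path > 4096 then false
  else if PySem.Str.isIn "\x00" path then false
  else pvCheckComp (PySem.Chars.splitOn path.toList ['/'])

-- ===== PORT B =====
-- the single pass of Source B: run = current slash-free run length
def pvScanRun : List Char → Nat → Bool
  | [], _ => true
  | c :: rest, run =>
    if c = '/' then pvScanRun rest 0
    else if run + 1 > 255 then false
    else pvScanRun rest (run + 1)

def is_valid_linux_path_alt (path : String) : Bool :=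
  if path == "" then false
  else if PySem.Str.strip path == "" then false
  else if PySem.Str.isIn "\x00" path || decide (PySem.Str.len path > 4096) then false
  else pvScanRun path.toList 0

-- ===== PRECONDITION & SPEC =====
def Spec_is_valid_linux_path (path : String) (out : Bool) : Prop := out = is_valid_linux_path_alt path
instance (path : String) (out : Bool) : Decidable (Spec_is_valid_linux_path path out) := by unfold Spec_is_valid_linux_path; infer_instance

-- ===== CLAIM (what is proved, stated in full; the proofs are below) =====
def Claim_equal_is_valid_linux_path : Prop := ∀ (path : String), Dom_is_valid_linux_path path → Spec_is_valid_linux_path path (is_valid_linux_path path)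

-- ===== LEMMAS AND PROOFS =====

-- reference splitter: split a char list at '/'
def pvSplitChar : List Char → List (List Char)
  | [] => [[]]
  | c :: rest =>
    if c = '/' then [] :: pvSplitChar rest
    else match pvSplitChar rest with
      | [] => [[c]]
      | p :: ps => (c :: p) :: ps

theorem pvSplitChar_ne_nil (cs : List Char) : pvSplitChar cs ≠ [] := by
  cases cs with
  | nil => simp [pvSplitChar]
  | cons c rest =>
    simp only [pvSplitChar]
    split <;> simp
    split <;> simp

-- head-prepending helper describing splitOn.go's accumulator
def pvConsHead (pre : List Char) : List (List Char) → List (List Char)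
  | [] => [pre]
  | p :: ps => (pre ++ p) :: ps

theorem pvGo_eq (fuel : Nat) (cs cur : List Char) (acc : List (List Char))
    (h : cs.length ≤ fuel) :
    PySem.Chars.splitOn.go ['/'] fuel cs cur acc
      = acc.reverse ++ pvConsHead cur.reverse (pvSplitChar cs) := by
  induction fuel generalizing cs cur acc with
  | zero =>
    have : cs = [] := by cases cs <;> simp_all
    subst this
    simp [PySem.Chars.splitOn.go, pvSplitChar, pvConsHead]
  | succ fuel ih =>
    cases cs with
    | nil => simp [PySem.Chars.splitOn.go, pvSplitChar, pvConsHead]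
    | cons c rest =>
      simp only [PySem.Chars.splitOn.go]
      by_cases hc : c = '/'
      · subst hc
        have hpre : List.isPrefixOf ['/'] ('/' :: rest) = true := by
          simp [List.isPrefixOf]
        rw [if_pos hpre]
        have hdrop : List.drop ['/'].length ('/' :: rest) = rest := rfl
        have hlen : rest.length ≤ fuel := by simpa using h
        rw [hdrop, ih _ _ _ hlen]
        obtain ⟨p, ps, hps⟩ : ∃ p ps, pvSplitChar rest = p :: ps := by
          cases hsp : pvSplitChar rest with
          | nil => exact absurd hsp (pvSplitChar_ne_nil rest)
          | cons p ps => exact ⟨p, ps, rfl⟩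
        simp [pvSplitChar, hps, pvConsHead]
      · have hpre : List.isPrefixOf ['/'] (c :: rest) = false := by
          simp [List.isPrefixOf]
          intro h'; exact absurd h'.symm hc
        rw [if_neg (by simp [hpre])]
        have hlen : rest.length ≤ fuel := by simpa using h
        rw [ih _ _ _ hlen]
        obtain ⟨p, ps, hps⟩ : ∃ p ps, pvSplitChar rest = p :: ps := by
          cases hsp : pvSplitChar rest with
          | nil => exact absurd hsp (pvSplitChar_ne_nil rest)
          | cons p ps => exact ⟨p, ps, rfl⟩
        simp [pvSplitChar, hc, hps, pvConsHead]

theorem pvSplitOn_eq (cs : List Char) :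
    PySem.Chars.splitOn cs ['/'] = pvSplitChar cs := by
  unfold PySem.Chars.splitOn
  rw [pvGo_eq _ _ _ _ (by omega)]
  obtain ⟨p, ps, hps⟩ : ∃ p ps, pvSplitChar cs = p :: ps := by
    cases hsp : pvSplitChar cs with
    | nil => exact absurd hsp (pvSplitChar_ne_nil cs)
    | cons p ps => exact ⟨p, ps, rfl⟩
  simp [hps, pvConsHead]

-- components of pvSplitChar contain no '/', and only characters of cs
theorem pvSplitChar_mem {cs : List Char} {p : List Char} (hp : p ∈ pvSplitChar cs) :
    '/' ∉ p ∧ ∀ a ∈ p, a ∈ cs := by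
  induction cs generalizing p with
  | nil => simp [pvSplitChar] at hp; simp [hp]
  | cons c rest ih =>
    simp only [pvSplitChar] at hp
    by_cases hc : c = '/'
    · simp [hc] at hp
      rcases hp with hp | hp
      · simp [hp]
      · obtain ⟨h1, h2⟩ := ih hp
        exact ⟨h1, fun a ha => List.mem_cons_of_mem _ (h2 a ha)⟩
    · rw [if_neg hc] at hp
      cases hsp : pvSplitChar rest with
      | nil => exact absurd hsp (pvSplitChar_ne_nil rest)
      | cons q qs =>
        rw [hsp] at hp
        rcases List.mem_cons.mp hp with hp | hp
        · subst hp
          have hq : q ∈ pvSplitChar rest := by rw [hsp]; exact List.mem_cons_self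
          obtain ⟨h1, h2⟩ := ih hq
          constructor
          · simp only [List.mem_cons]
            rintro (h | h)
            · exact hc h.symm
            · exact h1 h
          · intro a ha
            rcases List.mem_cons.mp ha with ha | ha
            · simp [ha]
            · exact List.mem_cons_of_mem _ (h2 a ha)
        · obtain ⟨h1, h2⟩ := ih (by rw [hsp]; exact List.mem_cons_of_mem _ hp)
          exact ⟨h1, fun a ha => List.mem_cons_of_mem _ (h2 a ha)⟩

theorem pvIsIn_singleton_false {a : Char} {c : List Char} (h : a ∉ c) :
    PySem.Chars.isIn [a] c = false := by
  rw [PySem.Chars.isIn_eq_false_iff]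
  intro hinf
  exact h (hinf.subset List.mem_cons_self)

-- given no '/' and no NUL inside any component, A's component check is just the length test
theorem pvCheckComp_eq_all {comps : List (List Char)}
    (h : ∀ p ∈ comps, '/' ∉ p ∧ '\x00' ∉ p) :
    pvCheckComp comps = comps.all (fun p => decide (p.length ≤ 255)) := by
  induction comps with
  | nil => rfl
  | cons c rest ih =>
    obtain ⟨h1, h2⟩ := h c List.mem_cons_self
    have hrest := ih (fun p hp => h p (List.mem_cons_of_mem _ hp))
    simp only [pvCheckComp, List.all_cons]
    by_cases he : c.isEmpty
    · have hce : c = [] := by cases c <;> simp_all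
      rw [if_pos he, hrest, hce]
      simp
    rw [if_neg he, pvIsIn_singleton_false h1, pvIsIn_singleton_false h2, Bool.or_self,
      if_neg (by simp)]
    by_cases hd : c = ['.'] ∨ c = ['.', '.']
    · rw [if_pos (by rcases hd with hd | hd <;> simp [hd]), hrest]
      rcases hd with hd | hd <;> simp [hd]
    rw [if_neg (by simpa using hd)]
    by_cases hl : c.length > 255
    · rw [if_pos hl]
      simp [Nat.not_le.mpr hl]
    rw [if_neg hl, hrest]
    simp [Nat.le_of_not_lt hl]

-- B's scan computes exactly the all-components-short test
theorem pvScanRun_eq (cs : List Char) (run : Nat) (h : run ≤ 255) :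
    pvScanRun cs run
      = (match pvSplitChar cs with
         | [] => true
         | p :: ps => decide (run + p.length ≤ 255) && ps.all (fun q => decide (q.length ≤ 255))) := by
  induction cs generalizing run with
  | nil => simp [pvScanRun, pvSplitChar, h]
  | cons c rest ih =>
    obtain ⟨p, ps, hps⟩ : ∃ p ps, pvSplitChar rest = p :: ps := by
      cases hsp : pvSplitChar rest with
      | nil => exact absurd hsp (pvSplitChar_ne_nil rest)
      | cons p ps => exact ⟨p, ps, rfl⟩
    by_cases hc : c = '/'
    · subst hc
      simp only [pvScanRun, pvSplitChar, ih 0 (by omega), hps]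
      simp [h, List.all_cons]
    · simp only [pvScanRun, pvSplitChar, if_neg hc, hps]
      by_cases hr : run + 1 > 255
      · have : ¬ (run + (p.length + 1) ≤ 255) := by omega
        simp [hr, this]
      · have h1 : run + 1 ≤ 255 := by omega
        rw [if_neg hr, ih (run + 1) h1, hps]
        show (decide (run + 1 + p.length ≤ 255) && ps.all fun q => decide (q.length ≤ 255)) = _
        rw [show run + 1 + p.length = run + (p.length + 1) from by omega]
        rfl

-- ===== VERDICT (by name: the statement is the Claim_ definition above) =====
theorem is_valid_linux_path_spec : Claim_equal_is_valid_linux_path := by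
  intro path _
  unfold Spec_is_valid_linux_path is_valid_linux_path is_valid_linux_path_alt
  by_cases h1 : path == ""
  · rw [if_pos h1, if_pos h1]
  rw [if_neg h1, if_neg h1]
  by_cases h2 : PySem.Str.strip path == ""
  · rw [if_pos h2, if_pos h2]
  rw [if_neg h2, if_neg h2]
  by_cases h3 : PySem.Str.isIn "\x00" path
  · have h3' : PySem.Chars.isIn ['\x00'] path.toList = true := by simpa using h3
    rw [if_pos h3, if_pos (by simp [h3'])]
  have h3' : PySem.Chars.isIn ['\x00'] path.toList = false := by simpa using h3
  by_cases h4 : PySem.Str.len path > 4096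
  · have h4' : 4096 < path.length := by
      have := h4
      simp [PySem.Str.len_eq] at this
      exact_mod_cast this
    rw [if_neg h3, if_pos h4, if_pos (by simp [h4'])]
  have h4' : path.length ≤ 4096 := by
    have := h4
    simp [PySem.Str.len_eq] at this
    exact_mod_cast this
  rw [if_neg h3, if_neg h4, if_neg h3,
    if_neg (by simp [h3']
               omega)]
  have hnul : '\x00' ∉ path.toList := by
    intro hmem
    apply h3
    rw [PySem.Str.isIn_iff_infix]
    obtain ⟨s, t, hst⟩ := List.append_of_mem hmem
    exact ⟨s, t, by simp [hst]⟩
  rw [pvSplitOn_eq,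
    pvCheckComp_eq_all (fun p hp => by
      obtain ⟨ha, hb⟩ := pvSplitChar_mem hp
      exact ⟨ha, fun hm => hnul (hb _ hm)⟩),
    pvScanRun_eq _ 0 (by omega)]
  obtain ⟨p, ps, hps⟩ : ∃ p ps, pvSplitChar path.toList = p :: ps := by
    cases hsp : pvSplitChar path.toList with
    | nil => exact absurd hsp (pvSplitChar_ne_nil _)
    | cons p ps => exact ⟨p, ps, rfl⟩
  simp [hps, List.all_cons]
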